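-- pv_equiv track=rewrite | github.com/StevenXoFk/Tarea-taller-Tkinter | convertidor.py | base10_a_base12
-- ===== SOURCE A (Python) =====
-- def base10_a_base12(numero):
--     res = 0
--     exponentee = 0
--     base12 = ""
--
--
--     diles = "0123456789ABCDEF"
--
--     while numero > 0:
--         nuevo = numero % 10
--         res += nuevo * (10 ** exponentee)
--         numero //= 10
--         exponentee += 1
--
--     while res > 0:
--         todo = res % 12
--         base12 = diles[todo] + base12
--         res //= 12
--
--     return base12
-- ===== SOURCE B (Python) =====
-- def base10_a_base12(numero):
--     # Recursive base-12 conversion; numero <= 0 yields "" exactly as A does.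
--     diles = "0123456789ABCDEF"
--     if numero <= 0:
--         return ""
--     return base10_a_base12(numero // 12) + diles[numero % 12]
-- ===== Notes on version B (the rewrite author's own statement) =====
-- stated objective: simpler
-- what changed: Drops A's dead decimal re-accumulation loop (res equals numero) and replaces the iterative prepend loop by a recursive conversion that appends digits as the recursion unwinds.
import Mathlib
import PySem

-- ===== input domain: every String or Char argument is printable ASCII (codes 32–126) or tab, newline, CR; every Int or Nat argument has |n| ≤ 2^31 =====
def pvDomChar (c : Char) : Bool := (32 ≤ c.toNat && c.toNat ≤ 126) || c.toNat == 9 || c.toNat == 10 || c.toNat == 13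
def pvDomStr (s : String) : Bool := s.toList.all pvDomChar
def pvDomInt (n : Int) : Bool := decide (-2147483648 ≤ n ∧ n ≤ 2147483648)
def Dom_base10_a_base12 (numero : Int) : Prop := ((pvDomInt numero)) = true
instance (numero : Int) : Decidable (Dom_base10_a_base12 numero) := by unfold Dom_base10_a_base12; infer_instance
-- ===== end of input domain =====

-- B drops A's dead decimal re-accumulation loop and converts to base 12 recursively (simpler).
-- ===== PORT A =====
-- first while loop: res += (numero % 10) * 10**exponentee; numero //= 10; exponentee += 1
def pvALoop1 (numero res exponentee : Int) : Int :=
  if h : numero > 0 then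
    pvALoop1 (PySem.Int.floordiv numero 10)
      (res + (PySem.Int.mod numero 10) * (10 : Int) ^ exponentee.toNat)
      (exponentee + 1)
  else res
termination_by numero.toNat
decreasing_by
  have := PySem.Int.floordiv_nonneg (a := numero) (b := 10) (by omega) (by omega)
  have h2 : PySem.Int.floordiv numero 10 = numero / 10 :=
    PySem.Int.floordiv_eq_ediv_of_pos (by omega)
  omega

-- second while loop: base12 = diles[res % 12] + base12; res //= 12
def pvALoop2 (res : Int) (base12 : String) : String :=
  if h : res > 0 then
    -- diles[todo]: index is always in range (0 ≤ res % 12 < 16), so pyGet? is some; .getD '0' is exact here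
    pvALoop2 (PySem.Int.floordiv res 12)
      ((((PySem.Str.pyGet? "0123456789ABCDEF" (PySem.Int.mod res 12)).getD '0').toString) ++ base12)
  else base12
termination_by res.toNat
decreasing_by
  have := PySem.Int.floordiv_nonneg (a := res) (b := 12) (by omega) (by omega)
  have h2 : PySem.Int.floordiv res 12 = res / 12 :=
    PySem.Int.floordiv_eq_ediv_of_pos (by omega)
  omega

def base10_a_base12 (numero : Int) : String :=
  pvALoop2 (pvALoop1 numero 0 0) ""

-- ===== PORT B =====
def base10_a_base12_alt (numero : Int) : String :=
  if h : numero ≤ 0 then ""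
  else
    base10_a_base12_alt (PySem.Int.floordiv numero 12) ++
      (((PySem.Str.pyGet? "0123456789ABCDEF" (PySem.Int.mod numero 12)).getD '0').toString)
termination_by numero.toNat
decreasing_by
  have := PySem.Int.floordiv_nonneg (a := numero) (b := 12) (by omega) (by omega)
  have h2 : PySem.Int.floordiv numero 12 = numero / 12 :=
    PySem.Int.floordiv_eq_ediv_of_pos (by omega)
  omega

-- ===== PRECONDITION & SPEC =====
def Spec_base10_a_base12 (numero : Int) (out : String) : Prop := out = base10_a_base12_alt numero
instance (numero : Int) (out : String) : Decidable (Spec_base10_a_base12 numero out) := by unfold Spec_base10_a_base12; infer_instance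

-- ===== CLAIM (what is proved, stated in full; the proofs are below) =====
def Claim_equal_base10_a_base12 : Prop := ∀ (numero : Int), Dom_base10_a_base12 numero → Spec_base10_a_base12 numero (base10_a_base12 numero)

-- ===== LEMMAS AND PROOFS =====

-- ===== VERDICT (by name: the statement is the Claim_ definition above) =====
-- loop1 reconstructs numero: pvALoop1 n res e = res + n * 10^e  (for 0 <= n, 0 <= e)
theorem pvALoop1_eq : ∀ (k : Nat) (n res e : Int), 0 ≤ n → 0 ≤ e → n.toNat ≤ k →
    pvALoop1 n res e = res + n * (10 : Int) ^ e.toNat := by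
  intro k
  induction k with
  | zero =>
    intro n res e hn he hk
    have h0 : n = 0 := by omega
    rw [pvALoop1]; simp [h0]
  | succ k ih =>
    intro n res e hn he hk
    rw [pvALoop1]
    split_ifs with h
    · have hd : PySem.Int.floordiv n 10 = n / 10 := PySem.Int.floordiv_eq_ediv_of_pos (by omega)
      have hm : PySem.Int.mod n 10 = n % 10 := PySem.Int.mod_eq_emod_of_pos (by omega)
      have hmod := Int.emod_nonneg n (show (10:Int) ≠ 0 by omega)
      have hmod2 := Int.emod_lt_of_pos n (show (0:Int) < 10 by omega)
      have hdiv := Int.mul_ediv_add_emod n 10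
      rw [hd, hm, ih (n / 10) _ (e + 1) (by omega) (by omega) (by omega)]
      have het : (e + 1).toNat = e.toNat + 1 := by omega
      rw [het, pow_succ]
      linear_combination ((10:Int) ^ e.toNat) * hdiv
    · have h0 : n = 0 := by omega
      simp [h0]

-- loop2 equals B's recursion with the accumulator appended on the right
theorem pvALoop2_eq : ∀ (k : Nat) (n : Int) (s : String), n.toNat ≤ k →
    pvALoop2 n s = base10_a_base12_alt n ++ s := by
  intro k
  induction k with
  | zero =>
    intro n s hk
    rw [pvALoop2, base10_a_base12_alt]
    simp [show ¬ n > 0 by omega, show n ≤ 0 by omega]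
  | succ k ih =>
    intro n s hk
    rw [pvALoop2, base10_a_base12_alt]
    split_ifs with h h2 h3
    · omega
    · have hd : PySem.Int.floordiv n 12 = n / 12 := PySem.Int.floordiv_eq_ediv_of_pos (by omega)
      rw [ih (PySem.Int.floordiv n 12) _ (by rw [hd]; omega)]
      rw [String.append_assoc]
    · simp
    · omega

theorem base10_a_base12_spec : Claim_equal_base10_a_base12 := by
  intro numero _
  unfold Spec_base10_a_base12
  rw [base10_a_base12]
  by_cases h : 0 < numero
  · rw [pvALoop1_eq numero.toNat numero 0 0 (by omega) le_rfl (by omega)]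
    simp only [Int.toNat_zero, pow_zero, mul_one, zero_add]
    rw [pvALoop2_eq numero.toNat numero "" (by omega), String.append_empty]
  · rw [pvALoop1]
    simp only [show ¬ numero > 0 from h, dif_neg, not_false_iff]
    rw [pvALoop2, base10_a_base12_alt]
    simp
    omega
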